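-- pv_equiv track=rewrite | github.com/entropy-research/Devon | devon/swebenchenv/environment/unified_diff/utils.py | find_nth_content_line
-- ===== SOURCE A (Python) =====
-- def find_nth_content_line(lines, n):
--     start = 0
--     for i, line in enumerate(lines):
--         if line != '':
--             start = i
--             break
--
--     count = 0
--     end = start
--     while end < len(lines) and count < n:
--
--         if lines[end] != '':
--             count += 1
--
--         end += 1
--
--     return lines[start:end] #maybe off by one? dont think so though, need to test
-- ===== SOURCE B (Python) =====
-- def find_nth_content_line(lines, n):
--     nonempty = [i for i, l in enumerate(lines) if l != '']
--     start = nonempty[0] if nonempty else 0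
--     if n <= 0:
--         end = start
--     elif n <= len(nonempty):
--         end = nonempty[n - 1] + 1
--     else:
--         end = len(lines)
--     return lines[start:end]
-- ===== Notes on version B (the rewrite author's own statement) =====
-- stated objective: simpler
-- what changed: Replaces A's linear scan with a counting while-loop by a one-shot table of non-empty line indices from which both slice bounds are read off arithmetically.
import Mathlib
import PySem

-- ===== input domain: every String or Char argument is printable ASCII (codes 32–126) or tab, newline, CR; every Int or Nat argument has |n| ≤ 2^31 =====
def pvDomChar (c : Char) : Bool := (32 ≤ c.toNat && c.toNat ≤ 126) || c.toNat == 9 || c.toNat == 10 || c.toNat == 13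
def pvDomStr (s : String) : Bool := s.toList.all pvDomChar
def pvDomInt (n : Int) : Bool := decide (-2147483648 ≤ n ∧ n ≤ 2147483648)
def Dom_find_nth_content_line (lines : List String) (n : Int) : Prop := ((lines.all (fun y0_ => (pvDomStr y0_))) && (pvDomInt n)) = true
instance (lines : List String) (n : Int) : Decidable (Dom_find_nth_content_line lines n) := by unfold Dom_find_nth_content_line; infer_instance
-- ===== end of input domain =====

-- B replaces A's scan-and-count while loop with a table of non-empty line indices
-- from which both slice bounds are computed; objective: simpler.

-- ===== PORT A =====
-- the for-loop over enumerate(lines): start = first index with a non-empty line, else 0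
def aStart : List String → Nat → Nat
  | [], _ => 0
  | l :: rest, i => if l ≠ "" then i else aStart rest (i + 1)

-- the while loop: advance end, counting non-empty lines, while end < len(lines) and count < n
def aLoop (lines : List String) (n : Int) (e : Nat) (count : Int) : Nat :=
  if h : e < lines.length ∧ count < n then
    let count' := if lines[e]'h.1 ≠ "" then count + 1 else count
    aLoop lines n (e + 1) count'
  else e
termination_by lines.length - e
decreasing_by omega

def find_nth_content_line (lines : List String) (n : Int) : List String :=
  let start := aStart lines 0
  let e := aLoop lines n start 0
  -- lines[start:end]
  PySem.List.slice lines (some (start : Int)) (some (e : Int))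

-- ===== PORT B =====
-- [i for i, l in enumerate(lines) if l != '']
def neIdx : List String → Nat → List Nat
  | [], _ => []
  | l :: rest, i => if l ≠ "" then i :: neIdx rest (i + 1) else neIdx rest (i + 1)

def find_nth_content_line_alt (lines : List String) (n : Int) : List String :=
  let nonempty := neIdx lines 0
  let start := nonempty.headD 0
  -- nonempty[n-1]: in range since 1 ≤ n ≤ len(nonempty) on that branch, so getD is exact
  let e : Nat :=
    if n ≤ 0 then start
    else if n ≤ (nonempty.length : Int) then nonempty.getD (n - 1).toNat 0 + 1
    else lines.length
  -- lines[start:end]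
  PySem.List.slice lines (some (start : Int)) (some (e : Int))

-- ===== PRECONDITION & SPEC =====
def Spec_find_nth_content_line (lines : List String) (n : Int) (out : List String) : Prop := out = find_nth_content_line_alt lines n
instance (lines : List String) (n : Int) (out : List String) : Decidable (Spec_find_nth_content_line lines n out) := by unfold Spec_find_nth_content_line; infer_instance

-- ===== CLAIM (what is proved, stated in full; the proofs are below) =====
def Claim_equal_find_nth_content_line : Prop := ∀ (lines : List String) (n : Int), Dom_find_nth_content_line lines n → Spec_find_nth_content_line lines n (find_nth_content_line lines n)

-- ===== LEMMAS AND PROOFS =====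

-- A's start equals the head of B's index table (default 0)
theorem aStart_eq_headD (l : List String) (i : Nat) : aStart l i = (neIdx l i).headD 0 := by
  induction l generalizing i with
  | nil => rfl
  | cons a rest ih =>
    simp only [aStart, neIdx]
    split <;> simp [ih]

theorem aStart_le (l : List String) (i : Nat) : aStart l i ≤ i + l.length := by
  induction l generalizing i with
  | nil => exact Nat.zero_le _
  | cons a rest ih =>
    simp only [aStart, List.length_cons]
    split
    · omega
    · have := ih (i + 1); omega

theorem mem_neIdx_le (l : List String) (i x : Nat) (hx : x ∈ neIdx l i) : i ≤ x := by
  induction l generalizing i with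
  | nil => simp [neIdx] at hx
  | cons a rest ih =>
    simp only [neIdx] at hx
    split at hx
    · rcases List.mem_cons.mp hx with h | h
      · omega
      · have := ih (i + 1) h; omega
    · have := ih (i + 1) hx; omega

-- if the index table starting at i is nonempty with head s, dropping up to s preserves it
theorem neIdx_drop (l : List String) (i s : Nat) (tl : List Nat)
    (h : neIdx l i = s :: tl) : aStart l i = s ∧ neIdx (l.drop (s - i)) s = neIdx l i := by
  induction l generalizing i with
  | nil => simp [neIdx] at h
  | cons a rest ih =>
    simp only [neIdx, aStart] at h ⊢
    by_cases ha : a ≠ ""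
    · simp only [ne_eq, ha, not_false_eq_true, ite_true] at h ⊢
      obtain ⟨rfl, rfl⟩ := (List.cons.injEq ..).mp h
      simp [neIdx, ha]
    · simp only [ha, ite_false] at h ⊢
      obtain ⟨h1, h2⟩ := ih (i + 1) h
      have hs : i + 1 ≤ s := by
        have : s ∈ neIdx rest (i + 1) := by rw [h]; exact List.mem_cons_self ..
        exact mem_neIdx_le _ _ _ this
      refine ⟨h1, ?_⟩
      have hd : (a :: rest).drop (s - i) = rest.drop (s - (i + 1)) := by
        have hsi : s - i = (s - (i + 1)) + 1 := by omega
        rw [hsi, List.drop_succ_cons]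
      rw [hd, h2]

-- the value of A's while loop, characterised by the index table of the remaining suffix
def endSpec (lines : List String) (n : Int) (e : Nat) (c : Int) : Nat :=
  if n ≤ c then e
  else if (n - c).toNat ≤ (neIdx (lines.drop e) e).length then
    (neIdx (lines.drop e) e).getD ((n - c).toNat - 1) 0 + 1
  else lines.length

theorem endSpec_step_empty (lines : List String) (n : Int) (e : Nat) (c : Int)
    (h1 : e < lines.length) (hne : lines[e] = "") (h2 : c < n) :
    endSpec lines n (e + 1) c = endSpec lines n e c := by
  have hrem : neIdx (lines.drop e) e = neIdx (lines.drop (e + 1)) (e + 1) := by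
    rw [List.drop_eq_getElem_cons h1, neIdx]; simp [hne]
  have hnc : ¬ n ≤ c := by omega
  unfold endSpec
  rw [if_neg hnc, if_neg hnc, hrem]

theorem endSpec_step_ne (lines : List String) (n : Int) (e : Nat) (c : Int)
    (h1 : e < lines.length) (hne : lines[e] ≠ "") (h2 : c < n) :
    endSpec lines n (e + 1) (c + 1) = endSpec lines n e c := by
  have hcons : neIdx (lines.drop e) e = e :: neIdx (lines.drop (e + 1)) (e + 1) := by
    rw [List.drop_eq_getElem_cons h1, neIdx]; simp [hne]
  have hnc : ¬ n ≤ c := by omega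
  unfold endSpec
  rw [hcons]
  by_cases hn : n ≤ c + 1
  · rw [if_pos hn, if_neg hnc]
    have hk : (n - c).toNat = 1 := by omega
    rw [hk, if_pos (by simp)]
    simp
  · rw [if_neg hn, if_neg hnc]
    have hk : (n - c).toNat - 1 = ((n - (c + 1)).toNat - 1) + 1 := by omega
    by_cases hkk : (n - (c + 1)).toNat ≤ (neIdx (lines.drop (e + 1)) (e + 1)).length
    · rw [if_pos hkk, if_pos (by simp only [List.length_cons]; omega), hk, List.getD_cons_succ]
    · rw [if_neg hkk, if_neg (by simp only [List.length_cons]; omega)]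

theorem aLoop_eq_endSpec (lines : List String) (n : Int) (e : Nat) (c : Int)
    (he : e ≤ lines.length) : aLoop lines n e c = endSpec lines n e c := by
  induction hfuel : lines.length - e using Nat.strong_induction_on generalizing e c with
  | _ fuel ih =>
  rw [aLoop]
  split
  · rename_i h
    obtain ⟨h1, h2⟩ := h
    show aLoop lines n (e + 1) (if lines[e]'h1 ≠ "" then c + 1 else c) = endSpec lines n e c
    have ihe : ∀ c'' : Int, aLoop lines n (e + 1) c'' = endSpec lines n (e + 1) c'' :=
      fun c'' => ih (lines.length - (e + 1)) (by omega) (e + 1) c'' (by omega) rfl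
    by_cases hne : lines[e] = ""
    · rw [if_neg (by simp [hne]), ihe, endSpec_step_empty lines n e c h1 hne h2]
    · rw [if_pos hne, ihe, endSpec_step_ne lines n e c h1 hne h2]
  · rename_i h
    unfold endSpec
    by_cases hn : n ≤ c
    · rw [if_pos hn]
    · rw [if_neg hn]
      have he' : e = lines.length := by omega
      subst he'
      rw [List.drop_length]
      simp only [neIdx, List.length_nil]
      rw [if_neg (by omega)]

-- A's end bound equals B's arithmetic bound
theorem end_eq (lines : List String) (n : Int) :
    endSpec lines n ((neIdx lines 0).headD 0) 0
      = if n ≤ 0 then (neIdx lines 0).headD 0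
        else if n ≤ ((neIdx lines 0).length : Int) then
          (neIdx lines 0).getD (n - 1).toNat 0 + 1
        else lines.length := by
  by_cases hn : n ≤ 0
  · rw [if_pos hn]; unfold endSpec; rw [if_pos hn]
  · rw [if_neg hn]
    unfold endSpec
    rw [if_neg hn]
    cases hNE : neIdx lines 0 with
    | nil =>
      simp only [hNE, List.headD_nil, List.drop_zero, List.length_nil]
      rw [if_neg (by omega), if_neg (by push_cast; omega)]
    | cons s tl =>
      obtain ⟨h1, h2⟩ := neIdx_drop lines 0 s tl hNE
      have h2' : neIdx (lines.drop s) s = s :: tl := by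
        rw [Nat.sub_zero] at h2; rw [h2, hNE]
      simp only [List.headD_cons, h2', Int.sub_zero]
      have hidx : n.toNat - 1 = (n - 1).toNat := by omega
      rw [hidx]
      by_cases hk : n ≤ ((s :: tl).length : Int)
      · rw [if_pos (by simp only [List.length_cons] at hk ⊢; omega), if_pos hk]
      · rw [if_neg (by simp only [List.length_cons] at hk ⊢; omega), if_neg hk]

-- ===== VERDICT (by name: the statement is the Claim_ definition above) =====
theorem find_nth_content_line_spec : Claim_equal_find_nth_content_line := by
  intro lines n _
  show find_nth_content_line lines n = find_nth_content_line_alt lines n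
  unfold find_nth_content_line find_nth_content_line_alt
  simp only [aStart_eq_headD]
  have hle : (neIdx lines 0).headD 0 ≤ lines.length := by
    have h := aStart_le lines 0
    rw [aStart_eq_headD] at h
    omega
  rw [aLoop_eq_endSpec lines n ((neIdx lines 0).headD 0) 0 hle, end_eq]
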